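-- pv_equiv track=rewrite | github.com/abcd1234564499sc/runJSFunctionByUrl | main.py | coordinatePlus
-- ===== SOURCE A (Python) =====
-- def coordinatePlus(nowCoordinate, maxCoordinate):
--     ifAddFlag = False
--     nowAddIndex = -1
--     while not ifAddFlag:
--         if len(nowCoordinate) + nowAddIndex == -1:
--             ifAddFlag = False
--             break
--         else:
--             nowCoordinateItem = nowCoordinate[nowAddIndex]
--             nowMaxCoordinateItem = maxCoordinate[nowAddIndex]
--             if nowCoordinateItem == nowMaxCoordinateItem:
--                 tmpAddIndex = nowAddIndex
--                 while tmpAddIndex != 0: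
--                     nowCoordinate[tmpAddIndex] = 0
--                     tmpAddIndex = tmpAddIndex + 1
--                 nowAddIndex = nowAddIndex - 1
--             else:
--                 nowCoordinate[nowAddIndex] = nowCoordinate[nowAddIndex] + 1
--                 ifAddFlag = True
--     return ifAddFlag, nowCoordinate
-- ===== SOURCE B (Python) =====
-- # One right-to-left scan: find the rightmost position that differs from its maximum,
-- # increment it and pad with zeros -- no repeated re-zeroing of the suffix (O(n) vs A's O(n^2)).
-- # Returns a fresh list; A mutates its argument in place (return-value equivalence only).
-- def coordinatePlus(nowCoordinate, maxCoordinate):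
--     n = len(nowCoordinate)
--     k = 1
--     while k <= n:
--         if nowCoordinate[-k] != maxCoordinate[-k]:
--             return True, nowCoordinate[:n - k] + [nowCoordinate[-k] + 1] + [0] * (k - 1)
--         k += 1
--     return False, [0] * n
-- ===== Notes on version B (the rewrite author's own statement) =====
-- stated objective: faster
-- what changed: B makes a single right-to-left scan for the first coordinate that differs from its maximum and builds the result once (prefix + incremented digit + zeros), instead of A's carry loop that re-zeroes the whole suffix at every carry step; Pre_ excludes inputs where maxCoordinate is a strict proper suffix shape of nowCoordinate (shorter and equal to nowCoordinate's tail), on which A raises IndexError.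
import Mathlib
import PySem

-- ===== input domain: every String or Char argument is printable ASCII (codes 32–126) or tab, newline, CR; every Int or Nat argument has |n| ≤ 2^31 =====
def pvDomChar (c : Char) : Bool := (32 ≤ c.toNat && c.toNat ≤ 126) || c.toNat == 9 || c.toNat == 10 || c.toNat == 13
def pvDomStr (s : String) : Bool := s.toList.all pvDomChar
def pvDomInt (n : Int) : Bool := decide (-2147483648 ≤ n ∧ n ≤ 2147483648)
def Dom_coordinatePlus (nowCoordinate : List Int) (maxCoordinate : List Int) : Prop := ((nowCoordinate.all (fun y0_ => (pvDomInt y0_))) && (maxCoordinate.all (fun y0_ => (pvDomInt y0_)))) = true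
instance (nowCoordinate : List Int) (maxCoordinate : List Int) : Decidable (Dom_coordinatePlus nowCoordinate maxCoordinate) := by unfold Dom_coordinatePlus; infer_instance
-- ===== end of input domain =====

-- B replaces A's carry loop (which re-zeroes the whole suffix at each carry step) by one
-- right-to-left scan that builds the result once. Equivalence is about the RETURN value:
-- Python A mutates its first argument in place, B returns a fresh list.

-- ===== PORT A =====
-- inner while of A: 'while tmpAddIndex != 0: nowCoordinate[tmpAddIndex] = 0; tmpAddIndex += 1'
-- (fuel = number of remaining iterations (-tmp).toNat; it only makes the loop total)
def pvZeroLoopAGo (L : List Int) (tmp : Int) (fuel : Nat) : List Int :=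
  match fuel with
  | 0 => L
  | f + 1 =>
    if tmp = 0 then L
    else pvZeroLoopAGo (PySem.List.pySetD L tmp 0) (tmp + 1) f

def pvZeroLoopA (L : List Int) (tmp : Int) : List Int :=
  pvZeroLoopAGo L tmp (-tmp).toNat

-- outer while loop of A; the list argument carries the in-place mutations
-- (fuel = remaining decrements of nowAddIndex before the break; it only makes the loop total)
def pvLoopAGo (L : List Int) (M : List Int) (idx : Int) (fuel : Nat) : Bool × List Int :=
  match fuel with
  | 0 => (false, L)
  | f + 1 =>
    if (L.length : Int) + idx = -1 then (false, L)
    else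
      match PySem.List.pyGet? L idx, PySem.List.pyGet? M idx with
      | some a, some b =>
          if a = b then pvLoopAGo (pvZeroLoopA L idx) M (idx - 1) f
          else (true, PySem.List.pySetD L idx (a + 1))
      | _, _ => (false, L)   -- IndexError in Python; excluded by Pre_

def coordinatePlus (nowCoordinate : List Int) (maxCoordinate : List Int) : Bool × List Int :=
  pvLoopAGo nowCoordinate maxCoordinate (-1) (((nowCoordinate.length : Int) + (-1) + 1).toNat)

-- ===== PORT B =====
-- B's single right-to-left scan 'while k <= n' (fuel = n + 2 - k; it only makes the loop total)
def pvScanBGo (now : List Int) (M : List Int) (k : Nat) (fuel : Nat) : Bool × List Int :=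
  match fuel with
  | 0 => (false, List.replicate now.length 0)
  | f + 1 =>
    if k ≤ now.length then
      match PySem.List.pyGet? now (-(k : Int)), PySem.List.pyGet? M (-(k : Int)) with
      | some a, some b =>
          if a ≠ b then
            (true, now.take (now.length - k) ++ [a + 1] ++ List.replicate (k - 1) 0)
          else pvScanBGo now M (k + 1) f
      | _, _ => (false, now)   -- IndexError in Python; excluded by Pre_
    else (false, List.replicate now.length 0)

def coordinatePlus_alt (nowCoordinate : List Int) (maxCoordinate : List Int) : Bool × List Int :=
  pvScanBGo nowCoordinate maxCoordinate 1 (nowCoordinate.length + 1)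

-- ===== PRECONDITION & SPEC =====
-- Pre_ excludes exactly the inputs where A raises IndexError (maxCoordinate strictly shorter
-- than nowCoordinate and equal to nowCoordinate's tail, so the carry runs past maxCoordinate);
-- B (Python) raises IndexError on exactly the same inputs.
def Pre_coordinatePlus (nowCoordinate : List Int) (maxCoordinate : List Int) : Prop :=
  ¬ (maxCoordinate.length < nowCoordinate.length ∧
     nowCoordinate.drop (nowCoordinate.length - maxCoordinate.length) = maxCoordinate)
instance (nowCoordinate : List Int) (maxCoordinate : List Int) : Decidable (Pre_coordinatePlus nowCoordinate maxCoordinate) := by unfold Pre_coordinatePlus; infer_instance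

def pvWitness_coordinatePlus : List Int × List Int := ([1, 2], [3, 4])

def Spec_coordinatePlus (nowCoordinate : List Int) (maxCoordinate : List Int) (out : Bool × List Int) : Prop := out = coordinatePlus_alt nowCoordinate maxCoordinate
instance (nowCoordinate : List Int) (maxCoordinate : List Int) (out : Bool × List Int) : Decidable (Spec_coordinatePlus nowCoordinate maxCoordinate out) := by unfold Spec_coordinatePlus; infer_instance

-- ===== CLAIM (what is proved, stated in full; the proofs are below) =====
def Claim_equal_coordinatePlus : Prop := ∀ (nowCoordinate : List Int) (maxCoordinate : List Int), Dom_coordinatePlus nowCoordinate maxCoordinate → Pre_coordinatePlus nowCoordinate maxCoordinate → Spec_coordinatePlus nowCoordinate maxCoordinate (coordinatePlus nowCoordinate maxCoordinate)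

-- ===== LEMMAS AND PROOFS =====

theorem pvSetD_neg (xs : List Int) (k : Nat) (v : Int) (h1 : 0 < k) (h2 : k ≤ xs.length) :
    PySem.List.pySetD xs (-(k:Int)) v = xs.set (xs.length - k) v := by
  simp only [PySem.List.pySetD, PySem.List.pySet?, PySem.List.pyIdx?]
  split_ifs with h3 h4 <;> simp <;> omega

theorem pvZeroLoopAGo_eq (k : Nat) (xs : List Int) (h1 : 0 < k) (h2 : k ≤ xs.length) :
    pvZeroLoopAGo xs (-(k:Int)) k = xs.take (xs.length - k) ++ List.replicate k 0 := by
  induction k generalizing xs with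
  | zero => omega
  | succ k ih =>
    rw [pvZeroLoopAGo]
    rw [if_neg (by omega),
        pvSetD_neg xs (k+1) 0 (by omega) (by exact_mod_cast h2)]
    rcases Nat.eq_zero_or_pos k with hk | hk
    · subst hk
      rw [show (-(((1:Nat)):Int) + 1) = 0 by norm_num]
      rw [pvZeroLoopAGo]
      rw [List.set_eq_take_cons_drop 0 (by omega : xs.length - 1 < xs.length)]
      have : xs.drop (xs.length - 1 + 1) = [] := by
        apply List.drop_eq_nil_of_le; omega
      simp [this]
    · have hstep : (-(((k+1):Nat)):Int) + 1 = -((k:Nat):Int) := by push_cast; ring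
      rw [hstep, ih (xs.set (xs.length - (k+1)) 0) hk (by simp; omega)]
      rw [List.set_eq_take_cons_drop 0 (by omega : xs.length - (k+1) < xs.length)]
      have hm : xs.length - (k+1) ≤ xs.length := by omega
      have hL : (List.take (xs.length - (k+1)) xs ++ 0 :: List.drop (xs.length - (k+1) + 1) xs).length - k = (xs.length - (k+1)) + 1 := by
        simp; omega
      rw [hL, List.take_append]
      have hlt : (List.take (xs.length - (k+1)) xs).length = xs.length - (k+1) := by simp
      rw [List.take_of_length_le (by omega), hlt]
      have : xs.length - (k+1) + 1 - (xs.length - (k+1)) = 1 := by omega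
      rw [this]
      simp [List.replicate_succ]

theorem pvZeroLoopA_eq (k : Nat) (xs : List Int) (h1 : 0 < k) (h2 : k ≤ xs.length) :
    pvZeroLoopA xs (-(k:Int)) = xs.take (xs.length - k) ++ List.replicate k 0 := by
  rw [pvZeroLoopA, show (-(-(k:Int))).toNat = k by omega]
  exact pvZeroLoopAGo_eq k xs h1 h2

theorem pvZ_len (now : List Int) (j : Nat) (hj : j ≤ now.length) :
    (now.take (now.length - j) ++ List.replicate j 0).length = now.length := by
  simp; omega

theorem pvZ_get (now : List Int) (j k : Nat) (hj : j ≤ now.length) (hk2 : k ≤ now.length)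
    (hjk : j < k) :
    PySem.List.pyGet? (now.take (now.length - j) ++ List.replicate j 0) (-(k:Int))
      = now[now.length - k]? := by
  rw [PySem.List.pyGet?_neg_natCast _ _ (by omega) (by rw [pvZ_len now j hj]; omega)]
  rw [pvZ_len now j hj]
  rw [List.getElem?_append_left (by simp; omega)]
  exact List.getElem?_take_of_lt (by omega)

theorem pvZ_take (now : List Int) (k : Nat) (h1 : 1 ≤ k) (h2 : k ≤ now.length) :
    List.take (now.length - k)
      (List.take (now.length - (k - 1)) now ++ List.replicate (k - 1) 0)
      = List.take (now.length - k) now := by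
  rw [List.take_append, List.take_take]
  have e1 : min (now.length - k) (now.length - (k - 1)) = now.length - k := by omega
  have e2 : now.length - k - (List.take (now.length - (k - 1)) now).length = 0 := by
    simp; omega
  rw [e1, e2]
  simp

-- if all positions compared so far were equal and M ran out, Pre_ fails
theorem pvNoneContra (now M : List Int) (k : Nat) (hk : k ≤ now.length)
    (hm : M.length < k)
    (heq : ∀ j : Nat, 1 ≤ j → j < k →
      PySem.List.pyGet? now (-(j : Int)) = PySem.List.pyGet? M (-(j : Int)))
    (hpre : Pre_coordinatePlus now M) : False := by
  apply hpre
  constructor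
  · omega
  · apply List.ext_getElem
    · simp; omega
    · intro i h1 h2
      have hj := heq (M.length - i) (by omega) (by omega)
      rw [PySem.List.pyGet?_neg_natCast _ _ (by omega) (by omega),
          PySem.List.pyGet?_neg_natCast _ _ (by omega) (by omega)] at hj
      have e1 : now.length - (M.length - i) = now.length - M.length + i := by omega
      have e2 : M.length - (M.length - i) = i := by omega
      rw [e1, e2] at hj
      rw [List.getElem_drop]
      have h3 : now.length - M.length + i < now.length := by omega
      rw [List.getElem?_eq_getElem h3, List.getElem?_eq_getElem (by omega)] at hj
      exact Option.some.inj hj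

-- invariant: entering step k, A's list is now with its last k-1 entries zeroed
theorem pvMain (now M : List Int) (hpre : Pre_coordinatePlus now M) :
    ∀ (m k : Nat), 1 ≤ k → k ≤ now.length + 1 → now.length + 1 - k = m →
    (∀ j : Nat, 1 ≤ j → j < k →
      PySem.List.pyGet? now (-(j : Int)) = PySem.List.pyGet? M (-(j : Int))) →
    pvLoopAGo (now.take (now.length - (k - 1)) ++ List.replicate (k - 1) 0) M (-(k : Int)) m
      = pvScanBGo now M k (m + 1) := by
  intro m
  induction m with
  | zero =>
    intro k hk1 hk2 hm _
    have hkn : k = now.length + 1 := by omega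
    subst hkn
    rw [pvLoopAGo, pvScanBGo]
    rw [if_neg (by omega)]
    have : now.length + 1 - 1 = now.length := by omega
    rw [this]
    simp
  | succ m ih =>
    intro k hk1 hk2 hm heq
    have hkn : k ≤ now.length := by omega
    have hZlen := pvZ_len now (k-1) (by omega)
    have hidx : now.length - k < now.length := by omega
    have hZget : PySem.List.pyGet?
        (now.take (now.length - (k - 1)) ++ List.replicate (k - 1) 0) (-(k : Int))
        = some (now[now.length - k]'hidx) := by
      rw [pvZ_get now (k-1) k (by omega) hkn (by omega)]
      exact List.getElem?_eq_getElem hidx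
    have hnowget : PySem.List.pyGet? now (-(k : Int)) = some (now[now.length - k]'hidx) := by
      rw [PySem.List.pyGet?_neg_natCast _ _ (by omega) hkn]
      exact List.getElem?_eq_getElem hidx
    rw [pvLoopAGo, pvScanBGo]
    rw [if_neg (by rw [hZlen]; omega)]
    rw [if_pos hkn]
    rcases hM : PySem.List.pyGet? M (-(k : Int)) with _ | b
    · -- M out of range: contradicts Pre_
      have hmk : M.length < k := by
        have := (PySem.List.pyGet?_eq_none_iff M (-(k:Int))).1 hM
        unfold PySem.Raise.InRange at this
        omega
      exact (pvNoneContra now M k hkn hmk heq hpre).elim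
    · simp only [hZget, hnowget]
      by_cases hab : (now[now.length - k]'hidx) = b
      · simp only [hab, ne_eq, not_true_eq_false, if_false]
        have hzero : pvZeroLoopA
            (now.take (now.length - (k - 1)) ++ List.replicate (k - 1) 0) (-(k : Int))
            = now.take (now.length - ((k+1) - 1)) ++ List.replicate ((k+1) - 1) 0 := by
          rw [pvZeroLoopA_eq k _ (by omega) (by rw [hZlen]; exact hkn), hZlen]
          rw [pvZ_take now k hk1 hkn]
          norm_num
        have hstep : -(k : Int) - 1 = -(((k+1) : Nat) : Int) := by push_cast; ring
        rw [hzero, hstep]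
        apply ih (k+1) (by omega) (by omega) (by omega)
        intro j hj1 hj2
        rcases Nat.lt_or_ge j k with hj | hj
        · exact heq j hj1 hj
        · have : j = k := by omega
          subst this
          rw [hnowget, hM, hab]
      · simp only [ne_eq, hab, not_false_eq_true, if_true]
        rw [pvSetD_neg _ k _ (by omega) (by rw [hZlen]; exact hkn), hZlen]
        rw [List.set_eq_take_cons_drop _ (by rw [hZlen]; exact hidx)]
        rw [pvZ_take now k hk1 hkn]
        have hlt : (now.take (now.length - (k-1))).length = now.length - k + 1 := by
          simp; omega
        rw [show now.length - k + 1 = (now.take (now.length - (k-1))).length from hlt.symm,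
            List.drop_left]
        simp

theorem pvTop (now M : List Int) (hpre : Pre_coordinatePlus now M) :
    coordinatePlus now M = coordinatePlus_alt now M := by
  unfold coordinatePlus coordinatePlus_alt
  have hfuel : (((now.length : Int)) + (-1) + 1).toNat = now.length := by omega
  rw [hfuel]
  have h := pvMain now M hpre (now.length + 1 - 1) 1 le_rfl (by omega) rfl
    (by intro j hj1 hj2; omega)
  have e : now.length + 1 - 1 = now.length := by omega
  rw [e] at h
  simpa using h

-- ===== VERDICT (by name: the statement is the Claim_ definition above) =====
theorem coordinatePlus_spec : Claim_equal_coordinatePlus := by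
  intro now M _hdom hpre
  exact pvTop now M hpre
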